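-- pv_equiv track=rewrite | github.com/sblumenf/podcastknowledge | seeding_pipeline/scripts/analyze_db_sync_detailed.py | find_title_matches
-- ===== SOURCE A (Python) =====
-- from typing import List, Set, Dict, Any
--
-- def normalize_title(title: str) -> str:
--     """Normalize a title for comparison"""
--     # Convert to lowercase and remove extra spaces
--     normalized = title.lower().strip()
--     # Replace common variations
--     normalized = normalized.replace('&', 'and')
--     normalized = normalized.replace(':', '')
--     normalized = normalized.replace('  ', ' ')
--     return normalized
--
-- def find_title_matches(vtt_files: Dict[str, str], episodes: List[dict]) -> Dict[str, List[str]]: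
--     """Find matches between VTT files and episodes by normalized title"""
--     matches = {}
--
--     # Create normalized title maps
--     vtt_normalized = {filename: normalize_title(title) for filename, title in vtt_files.items()}
--
--     for episode in episodes:
--         if 'title' in episode and episode['title']:
--             episode_normalized = normalize_title(episode['title'])
--
--             # Find matching VTT files
--             matching_files = []
--             for filename, vtt_norm_title in vtt_normalized.items():
--                 if episode_normalized == vtt_norm_title:
--                     matching_files.append(filename)
--
--             if matching_files:
--                 matches[episode['title']] = matching_files
--
--     return matches
-- ===== SOURCE B (Python) =====
-- def normalize_title(title: str) -> str:
--     """Normalize a title for comparison"""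
--     normalized = title.lower().strip()
--     normalized = normalized.replace('&', 'and')
--     normalized = normalized.replace(':', '')
--     normalized = normalized.replace('  ', ' ')
--     return normalized
--
-- def find_title_matches(vtt_files, episodes):
--     """Index-then-probe: group filenames by normalized title once, then a single
--     lookup per episode; duplicate episode titles are skipped via a seen-set (the
--     matched list depends only on the title, so re-inserting it is a no-op)."""
--     index = {}
--     for filename, title in vtt_files.items():
--         index.setdefault(normalize_title(title), []).append(filename)
--     pairs = []
--     seen = set()
--     for episode in episodes:
--         t = episode.get('title')
--         if t and t not in seen:
--             seen.add(t)
--             files = index.get(normalize_title(t), [])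
--             if files:
--                 pairs.append((t, files))
--     return dict(pairs)
-- ===== Notes on version B (the rewrite author's own statement) =====
-- stated objective: alternative
-- what changed: Replaces A's per-episode linear scan over all normalized VTT titles with one grouping pass building a normalized-title -> filenames multimap plus a seen-set that skips duplicate episode titles, so the result is assembled as a plain ordered pair list instead of a dict of repeated overwrites.
import Mathlib
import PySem

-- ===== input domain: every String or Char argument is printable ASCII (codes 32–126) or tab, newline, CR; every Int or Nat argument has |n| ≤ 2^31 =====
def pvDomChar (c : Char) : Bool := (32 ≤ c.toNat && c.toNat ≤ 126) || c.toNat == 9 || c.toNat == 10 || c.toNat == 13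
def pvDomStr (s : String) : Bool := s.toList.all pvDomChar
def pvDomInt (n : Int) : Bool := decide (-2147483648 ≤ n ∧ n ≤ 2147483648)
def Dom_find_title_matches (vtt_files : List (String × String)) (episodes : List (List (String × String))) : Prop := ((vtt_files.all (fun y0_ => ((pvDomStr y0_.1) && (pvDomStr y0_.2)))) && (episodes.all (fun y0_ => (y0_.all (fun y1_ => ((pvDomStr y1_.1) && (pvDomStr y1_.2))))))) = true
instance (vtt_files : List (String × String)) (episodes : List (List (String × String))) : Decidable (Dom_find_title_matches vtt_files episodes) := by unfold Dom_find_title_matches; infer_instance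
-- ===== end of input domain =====

-- ===== PORT A =====
-- B builds a normalized-title -> filenames index once and probes it per episode,
-- skipping duplicate titles with a seen-set, instead of A's per-episode scan (same return value).
def normalizeTitle (title : String) : String :=
  let normalized := PySem.Str.strip (PySem.Str.lower title)
  let normalized := PySem.Str.replace normalized "&" "and"
  let normalized := PySem.Str.replace normalized ":" ""
  PySem.Str.replace normalized "  " " "

def find_title_matches (vtt_files : List (String × String)) (episodes : List (List (String × String))) : List (String × List String) :=
  -- dict comprehension over vtt_files.items(); a dict's keys are distinct, so it is a map over the items
  let vtt_normalized : List (String × String) := vtt_files.map (fun p => (p.1, normalizeTitle p.2))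
  let matched : PySem.Dict String (List String) :=
    episodes.foldl (fun acc episode =>
      match (PySem.Dict.mk episode).get? "title" with
      | some t =>
        if t ≠ "" then
          let episode_normalized := normalizeTitle t
          let matching_files := vtt_normalized.foldl
            (fun acc p => if episode_normalized == p.2 then acc ++ [p.1] else acc) []
          if matching_files ≠ [] then acc.insert t matching_files else acc
        else acc
      | none => acc) PySem.Dict.empty
  matched.items

-- ===== PORT B =====
-- the episode loop of Source B: a recursion over episodes carrying the seen-set, emitting pairs front-to-back
def probe_episodes (index : PySem.Dict String (List String)) (seen : PySem.Set String) :
    List (List (String × String)) → List (String × List String)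
  | [] => []
  | episode :: rest =>
    match (PySem.Dict.mk episode).get? "title" with
    | some t =>
      if t ≠ "" ∧ t ∉ seen then
        let files := index.getD (normalizeTitle t) []
        if files ≠ [] then (t, files) :: probe_episodes index (PySem.Set.add seen t) rest
        else probe_episodes index (PySem.Set.add seen t) rest
      else probe_episodes index seen rest
    | none => probe_episodes index seen rest

def find_title_matches_alt (vtt_files : List (String × String)) (episodes : List (List (String × String))) : List (String × List String) :=
  -- index.setdefault(norm, []).append(filename) is Dict.modify norm [] (· ++ [filename])
  let index : PySem.Dict String (List String) :=
    vtt_files.foldl (fun d p => d.modify (normalizeTitle p.2) [] (· ++ [p.1])) PySem.Dict.empty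
  -- dict(pairs): the pair keys are distinct first occurrences, so its items are exactly the pairs
  probe_episodes index [] episodes

-- ===== PRECONDITION & SPEC =====
def Spec_find_title_matches (vtt_files : List (String × String)) (episodes : List (List (String × String))) (out : List (String × List String)) : Prop := out = find_title_matches_alt vtt_files episodes
instance (vtt_files : List (String × String)) (episodes : List (List (String × String))) (out : List (String × List String)) : Decidable (Spec_find_title_matches vtt_files episodes out) := by unfold Spec_find_title_matches; infer_instance

-- ===== CLAIM (what is proved, stated in full; the proofs are below) =====
def Claim_equal_find_title_matches : Prop := ∀ (vtt_files : List (String × String)) (episodes : List (List (String × String))), Dom_find_title_matches vtt_files episodes → Spec_find_title_matches vtt_files episodes (find_title_matches vtt_files episodes)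

-- ===== LEMMAS AND PROOFS =====
-- A's inner scan over the normalized pairs collects exactly the bucket the index stores at the episode's normalized title.
theorem inner_scan_eq_index (vtt : List (String × String)) (en : String) :
    (vtt.map (fun p => (p.1, normalizeTitle p.2))).foldl
        (fun acc p => if en == p.2 then acc ++ [p.1] else acc) []
      = (vtt.foldl (fun d p => d.modify (normalizeTitle p.2) [] (· ++ [p.1]))
          PySem.Dict.empty).getD en [] := by
  have hmap : vtt.foldl (fun d p => d.modify (normalizeTitle p.2) [] (· ++ [p.1])) PySem.Dict.empty
      = (vtt.map (fun p => (normalizeTitle p.2, p.1))).foldl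
          (fun d q => d.modify q.1 [] (· ++ [q.2])) PySem.Dict.empty := by
    rw [List.foldl_map]
  rw [PySem.List.foldl_append_if, hmap, PySem.Dict.getD_foldl_modify_append]
  simp only [List.filter_map, List.map_map, Function.comp_def, List.nil_append,
    PySem.Dict.getD_empty]
  have hpred : (fun p : String × String => en == normalizeTitle p.2)
      = (fun p : String × String => normalizeTitle p.2 == en) := by
    funext p; exact BEq.comm
  rw [hpred]

-- re-inserting a key whose stored value is already v leaves the dict unchanged
theorem insert_eq_self (d : PySem.Dict String (List String)) (t : String) (v : List String)
    (hc : d.contains t = true) (hv : ∀ w, (t, w) ∈ d.items → w = v) :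
    d.insert t v = d := by
  apply PySem.Dict.ext
  rw [PySem.Dict.items_insert_of_contains d v hc]
  conv_rhs => rw [← List.map_id d.items]
  apply List.map_congr_left
  intro p hp
  simp only [id_eq]
  by_cases h : p.1 = t
  · have h2v : p.2 = v := hv p.2 (by rw [← h]; exact hp)
    rw [if_pos (by simp [h]), ← h, ← h2v]
  · rw [if_neg (by simp [h])]

-- invariant of the two episode loops: A's dict fold appends exactly B's probe list
theorem loop_eq (index : PySem.Dict String (List String))
    (eps : List (List (String × String)))
    (d : PySem.Dict String (List String)) (seen : List String)
    (hnd : d.keys.Nodup)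
    (h1 : ∀ t, d.contains t = true → t ∈ seen)
    (h2 : ∀ t, t ∈ seen → index.getD (normalizeTitle t) [] ≠ [] → d.contains t = true)
    (hval : ∀ t v, (t, v) ∈ d.items → v = index.getD (normalizeTitle t) []) :
    (eps.foldl (fun acc episode =>
      match (PySem.Dict.mk episode).get? "title" with
      | some t =>
        if t ≠ "" then
          (if index.getD (normalizeTitle t) [] ≠ []
            then acc.insert t (index.getD (normalizeTitle t) []) else acc)
        else acc
      | none => acc) d).items
    = d.items ++ probe_episodes index seen eps := by
  induction eps generalizing d seen with
  | nil => simp [probe_episodes]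
  | cons episode rest ih =>
    simp only [List.foldl_cons, probe_episodes]
    cases hti : (PySem.Dict.mk episode).get? "title" with
    | none => exact ih d seen hnd h1 h2 hval
    | some t =>
      simp only []
      by_cases ht : t = ""
      · rw [if_neg (fun h => h ht), if_neg (fun (h : t ≠ "" ∧ t ∉ seen) => h.1 ht)]
        exact ih d seen hnd h1 h2 hval
      · by_cases hs : t ∈ seen
        · -- seen before: B skips; A's step is a no-op (empty bucket, or re-insert of the same value)
          rw [if_pos ht, if_neg (fun (h : t ≠ "" ∧ t ∉ seen) => h.2 hs)]
          by_cases hg : index.getD (normalizeTitle t) [] = []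
          · rw [if_neg (fun h => h hg)]
            exact ih d seen hnd h1 h2 hval
          · rw [if_pos hg, insert_eq_self d t _ (h2 t hs hg) (fun w hw => hval t w hw)]
            exact ih d seen hnd h1 h2 hval
        · -- fresh title
          have hc : d.contains t = false := by
            cases hcc : d.contains t with
            | false => rfl
            | true => exact absurd (h1 t hcc) hs
          rw [if_pos ht, if_pos (And.intro ht hs)]
          by_cases hg : index.getD (normalizeTitle t) [] = []
          · rw [if_neg (fun h => h hg), if_neg (fun h => h hg)]
            refine ih d (PySem.Set.add seen t) hnd ?_ ?_ hval
            · intro t' h'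
              exact (PySem.Set.mem_add seen t t').2 (Or.inl (h1 t' h'))
            · intro t' h' hg'
              rcases (PySem.Set.mem_add seen t t').1 h' with h'' | h''
              · exact h2 t' h'' hg'
              · subst h''; exact absurd hg (fun h => hg' h)
          · rw [if_pos hg, if_pos hg]
            have hnd' := PySem.Dict.nodup_keys_insert d t (index.getD (normalizeTitle t) []) hnd
            have h1' : ∀ t', (d.insert t (index.getD (normalizeTitle t) [])).contains t' = true →
                t' ∈ PySem.Set.add seen t := by
              intro t' h'
              rw [PySem.Dict.contains_insert] at h'
              rcases Bool.or_eq_true_iff.mp h' with h'' | h''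
              · exact (PySem.Set.mem_add seen t t').2 (Or.inr (eq_of_beq h''))
              · exact (PySem.Set.mem_add seen t t').2 (Or.inl (h1 t' h''))
            have h2' : ∀ t', t' ∈ PySem.Set.add seen t → index.getD (normalizeTitle t') [] ≠ [] →
                (d.insert t (index.getD (normalizeTitle t) [])).contains t' = true := by
              intro t' h' hg'
              rw [PySem.Dict.contains_insert]
              rcases (PySem.Set.mem_add seen t t').1 h' with h'' | h''
              · rw [h2 t' h'' hg']; simp
              · subst h''; simp
            have hv' : ∀ t' v, (t', v) ∈ (d.insert t (index.getD (normalizeTitle t) [])).items →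
                v = index.getD (normalizeTitle t') [] := by
              intro t' v hv
              rcases (PySem.Dict.mem_items_insert d t _ (t', v)).1 hv with h'' | h''
              · have e1 : t' = t := congrArg Prod.fst h''
                have e2 : v = index.getD (normalizeTitle t) [] := congrArg Prod.snd h''
                subst e1; exact e2
              · exact hval t' v h''.1
            rw [ih _ _ hnd' h1' h2' hv', PySem.Dict.items_insert_of_not_contains d _ hc]
            simp

-- ===== VERDICT (by name: the statement is the Claim_ definition above) =====
theorem find_title_matches_spec : Claim_equal_find_title_matches := by
  intro vtt_files episodes _
  show find_title_matches vtt_files episodes = find_title_matches_alt vtt_files episodes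
  unfold find_title_matches find_title_matches_alt
  simp only []
  have hfold : episodes.foldl (fun (acc : PySem.Dict String (List String)) episode =>
      match (PySem.Dict.mk episode).get? "title" with
      | some t =>
        if t ≠ "" then
          (if (vtt_files.map (fun p => (p.1, normalizeTitle p.2))).foldl
              (fun (acc : List String) (p : String × String) =>
                if normalizeTitle t == p.2 then acc ++ [p.1] else acc) [] ≠ []
            then acc.insert t ((vtt_files.map (fun p => (p.1, normalizeTitle p.2))).foldl
              (fun (acc : List String) (p : String × String) =>
                if normalizeTitle t == p.2 then acc ++ [p.1] else acc) [])
            else acc)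
        else acc
      | none => acc) PySem.Dict.empty
      = episodes.foldl (fun (acc : PySem.Dict String (List String)) episode =>
      match (PySem.Dict.mk episode).get? "title" with
      | some t =>
        if t ≠ "" then
          (if (vtt_files.foldl (fun (d : PySem.Dict String (List String)) (p : String × String) =>
                d.modify (normalizeTitle p.2) [] (· ++ [p.1])) PySem.Dict.empty).getD (normalizeTitle t) [] ≠ []
            then acc.insert t ((vtt_files.foldl (fun (d : PySem.Dict String (List String)) (p : String × String) =>
                d.modify (normalizeTitle p.2) [] (· ++ [p.1])) PySem.Dict.empty).getD (normalizeTitle t) [])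
            else acc)
        else acc
      | none => acc) PySem.Dict.empty := by
    apply PySem.List.foldl_congr_mem
    intro acc ep _
    cases (PySem.Dict.mk ep).get? "title" with
    | none => rfl
    | some t => simp only [inner_scan_eq_index]
  rw [hfold, loop_eq _ episodes PySem.Dict.empty []
    PySem.Dict.nodup_keys_empty
    (fun t h => by rw [PySem.Dict.contains_empty] at h; exact absurd h (by simp))
    (fun t ht _ => absurd ht (by simp))
    (fun t v h => by simp [PySem.Dict.empty] at h)]
  simp [PySem.Dict.empty]
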